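-- pv_equiv track=rewrite | github.com/sourabbanka22/Competitive-Programming-Foundation | Dynamic Programming/squareOfZeroes.py | preComputeValues
-- ===== SOURCE A (Python) =====
-- def preComputeValues(matrix):
--     infoMatrix = [[None for _ in row] for row in matrix]
--     size = len(matrix)
--
--     for row in range(size):
--         for col in range(size):
--             numZeroes = 1 if matrix[row][col]==0 else 0
--             infoMatrix[row][col] = {
--                 "numZeroesBelow": numZeroes,
--                 "numZeroesRight": numZeroes,
--             }
--
--     lastIdx = len(matrix)-1
--     for row in reversed(range(size)):
--         for col in reversed(range(size)):
--             if matrix[row][col] == 1: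
--                 continue
--             if row<lastIdx:
--                 infoMatrix[row][col]["numZeroesBelow"] += infoMatrix[row+1][col]["numZeroesBelow"]
--             if col<lastIdx:
--                 infoMatrix[row][col]["numZeroesRight"] += infoMatrix[row][col+1]["numZeroesRight"]
--
--     return infoMatrix
-- ===== SOURCE B (Python) =====
-- def preComputeValues(matrix):
--     size = len(matrix)
--
--     def scan(vals):
--         # right-to-left accumulation of consecutive countable zeroes
--         acc = 0
--         out = []
--         for v in reversed(vals):
--             acc = (1 if v == 0 else 0) + (acc if v != 1 else 0)
--             out.append(acc)
--         out.reverse()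
--         return out
--
--     right = [scan(row) for row in matrix]
--     belowT = [scan([matrix[r][c] for r in range(size)]) for c in range(size)]
--     return [[{"numZeroesBelow": b, "numZeroesRight": g}
--              for b, g in zip([belowT[c][r] for c in range(size)], right[r], strict=True)]
--             for r in range(size)]
-- ===== Notes on version B (the rewrite author's own statement) =====
-- stated objective: alternative
-- what changed: Replaces A's two nested passes over a mutable per-cell dict matrix (initialize all cells, then accumulate in reverse with in-place '+=') by two independent one-directional scans (each row right-to-left, each column bottom-to-top) producing plain integer tables that a strict zip assembles into the per-cell dicts once.
-- outside the precondition, e.g. on preComputeValues([[1, 0]]): A returns [[{'numZeroesBelow': 0, 'numZeroesRight': 0}, None]], B raises ValueError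
import Mathlib
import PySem

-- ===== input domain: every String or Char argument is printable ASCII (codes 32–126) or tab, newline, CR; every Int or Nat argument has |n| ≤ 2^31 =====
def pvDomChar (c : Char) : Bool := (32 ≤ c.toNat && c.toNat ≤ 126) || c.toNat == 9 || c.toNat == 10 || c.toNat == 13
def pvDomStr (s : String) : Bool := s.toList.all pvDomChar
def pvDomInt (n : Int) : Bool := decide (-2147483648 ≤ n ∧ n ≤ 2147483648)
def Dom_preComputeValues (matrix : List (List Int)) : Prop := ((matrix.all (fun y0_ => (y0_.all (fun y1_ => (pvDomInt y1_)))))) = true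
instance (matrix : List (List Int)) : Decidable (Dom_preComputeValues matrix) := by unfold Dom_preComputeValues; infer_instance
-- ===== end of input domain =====

-- B replaces A's mutable dict-matrix (init pass + reverse accumulation pass with '+=') by two
-- independent directional integer scans (rows right-to-left, columns bottom-to-top) assembled once.

-- ===== PORT A =====
-- dict helpers for the per-cell association list: first-match get, overwrite-in-place set
-- (exact for Python's d[k] / d[k] = v when the key is present, which Pre_ guarantees here)
def pvDGet (d : List (String × Int)) (k : String) : Int :=
  ((d.find? (fun p => p.1 == k)).map Prod.snd).getD 0

def pvDSet (d : List (String × Int)) (k : String) (v : Int) : List (String × Int) :=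
  d.map (fun p => if p.1 == k then (k, v) else p)

-- infoMatrix[r][c] read / write (indices in range under Pre_, so getD/set are exact)
def pvGetCell (info : List (List (List (String × Int)))) (r c : Nat) : List (String × Int) :=
  (info.getD r []).getD c []

def pvSetCell (info : List (List (List (String × Int)))) (r c : Nat)
    (v : List (String × Int)) : List (List (List (String × Int))) :=
  info.set r ((info.getD r []).set c v)

def preComputeValues (matrix : List (List Int)) : List (List (List (String × Int))) :=
  let size := matrix.length
  -- infoMatrix = [[None for _ in row] for row in matrix]  (None rendered as [])
  let info0 : List (List (List (String × Int))) :=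
    matrix.map (fun row => row.map (fun _ => ([] : List (String × Int))))
  -- first double loop: initialise every cell
  let info1 := (List.range size).foldl (fun info row =>
    (List.range size).foldl (fun info col =>
      let numZeroes : Int := if (matrix.getD row []).getD col 0 = 0 then 1 else 0
      pvSetCell info row col [("numZeroesBelow", numZeroes), ("numZeroesRight", numZeroes)]) info) info0
  let lastIdx := matrix.length - 1
  -- second double loop, reversed, with in-place '+='
  (List.range size).reverse.foldl (fun info row =>
    (List.range size).reverse.foldl (fun info col =>
      if (matrix.getD row []).getD col 0 = 1 then info
      else
        let info2 := if row < lastIdx then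
            pvSetCell info row col
              (pvDSet (pvGetCell info row col) "numZeroesBelow"
                (pvDGet (pvGetCell info row col) "numZeroesBelow" +
                 pvDGet (pvGetCell info (row + 1) col) "numZeroesBelow"))
          else info
        if col < lastIdx then
            pvSetCell info2 row col
              (pvDSet (pvGetCell info2 row col) "numZeroesRight"
                (pvDGet (pvGetCell info2 row col) "numZeroesRight" +
                 pvDGet (pvGetCell info2 row (col + 1)) "numZeroesRight"))
        else info2) info) info1

-- ===== PORT B =====
-- scan: right-to-left accumulation (acc, out) with a final reverse, as in Source B
def pvScan (vals : List Int) : List Int :=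
  (vals.reverse.foldl (fun (p : Int × List Int) v =>
      let acc := (if v = 0 then (1 : Int) else 0) + (if v ≠ 1 then p.1 else 0)
      (acc, p.2 ++ [acc])) ((0 : Int), ([] : List Int))).2.reverse

def preComputeValues_alt (matrix : List (List Int)) : List (List (List (String × Int))) :=
  let size := matrix.length
  let right := matrix.map pvScan
  let belowT := (List.range size).map (fun c =>
    pvScan ((List.range size).map (fun r => (matrix.getD r []).getD c 0)))
  -- zip(..., strict=True): List.zip is exact under Pre_ (equal lengths; Python raises only off Pre_)
  (List.range size).map (fun r =>
    (List.zip ((List.range size).map (fun c => (belowT.getD c []).getD r 0))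
              (right.getD r [])).map
      (fun p => [("numZeroesBelow", p.1), ("numZeroesRight", p.2)]))

-- ===== PRECONDITION & SPEC =====
-- Pre_ excludes non-square matrices: on a short row A raises IndexError, and on a long row A
-- returns a matrix that still contains None cells (not a value of the declared cell type).
def Pre_preComputeValues (matrix : List (List Int)) : Prop :=
  ∀ row ∈ matrix, row.length = matrix.length

instance (matrix : List (List Int)) : Decidable (Pre_preComputeValues matrix) := by
  unfold Pre_preComputeValues; infer_instance

def pvWitness_preComputeValues : List (List Int) := [[0, 1], [0, 0]]

def Spec_preComputeValues (matrix : List (List Int)) (out : List (List (List (String × Int)))) : Prop :=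
  out = preComputeValues_alt matrix
instance (matrix : List (List Int)) (out : List (List (List (String × Int)))) : Decidable (Spec_preComputeValues matrix out) := by unfold Spec_preComputeValues; infer_instance

-- ===== CLAIM (what is proved, stated in full; the proofs are below) =====
def Claim_equal_preComputeValues : Prop := ∀ (matrix : List (List Int)), Dom_preComputeValues matrix → Pre_preComputeValues matrix → Spec_preComputeValues matrix (preComputeValues matrix)

-- ===== LEMMAS AND PROOFS =====

-- the value matrix[r][c] (in range under Pre_) and the 0/1 base count
def pvVal (m : List (List Int)) (r c : Nat) : Int := (m.getD r []).getD c 0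
def pvBase (m : List (List Int)) (r c : Nat) : Int := if pvVal m r c = 0 then 1 else 0

-- the intended fixpoint values of the two counters
def pvBelow (m : List (List Int)) (r c : Nat) : Int :=
  if h : pvVal m r c ≠ 1 ∧ r + 1 < m.length then pvBase m r c + pvBelow m (r + 1) c
  else pvBase m r c
termination_by m.length - r
decreasing_by omega

def pvRight (m : List (List Int)) (r c : Nat) : Int :=
  if h : pvVal m r c ≠ 1 ∧ c + 1 < m.length then pvBase m r c + pvRight m r (c + 1)
  else pvBase m r c
termination_by m.length - c
decreasing_by omega

def pvCell0 (m : List (List Int)) (r c : Nat) : List (String × Int) :=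
  [("numZeroesBelow", pvBase m r c), ("numZeroesRight", pvBase m r c)]

def pvCellF (m : List (List Int)) (r c : Nat) : List (String × Int) :=
  [("numZeroesBelow", pvBelow m r c), ("numZeroesRight", pvRight m r c)]

def pvShape (m : List (List Int)) (info : List (List (List (String × Int)))) : Prop :=
  info.length = m.length ∧ ∀ r, r < m.length → (info.getD r []).length = m.length

-- structural recursion equivalent of pvScan
def pvScanRec : List Int → List Int
  | [] => []
  | v :: vs =>
      ((if v = 0 then (1 : Int) else 0) + (if v ≠ 1 then (pvScanRec vs).headD 0 else 0)) :: pvScanRec vs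

lemma pvScan_loop (vs : List Int) :
    vs.reverse.foldl (fun (p : Int × List Int) v =>
      let acc := (if v = 0 then (1 : Int) else 0) + (if v ≠ 1 then p.1 else 0)
      (acc, p.2 ++ [acc])) ((0 : Int), ([] : List Int))
    = ((pvScanRec vs).headD 0, (pvScanRec vs).reverse) := by
  induction vs with
  | nil => rfl
  | cons v vs ih =>
      rw [List.reverse_cons, List.foldl_append, ih]
      simp [pvScanRec]

lemma pvScan_eq (vs : List Int) : pvScan vs = pvScanRec vs := by
  unfold pvScan
  rw [pvScan_loop]
  simp

lemma pvScanRec_length (l : List Int) : (pvScanRec l).length = l.length := by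
  induction l with
  | nil => rfl
  | cons v vs ih => simp [pvScanRec, ih]

lemma pvScanRec_getD (l : List Int) (i : Nat) (hi : i < l.length) :
    (pvScanRec l).getD i 0 =
      (if l.getD i 0 = 0 then 1 else 0) +
      (if l.getD i 0 ≠ 1 ∧ i + 1 < l.length then (pvScanRec l).getD (i + 1) 0 else 0) := by
  induction l generalizing i with
  | nil => simp at hi
  | cons v vs ih =>
      cases i with
      | zero =>
          cases vs with
          | nil => simp [pvScanRec]
          | cons w ws =>
              simp only [pvScanRec, List.getD_cons_zero, List.getD_cons_succ, List.length_cons]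
              have h1 : (0:Nat) + 1 < ws.length + 1 + 1 := by omega
              simp [h1, List.headD]
      | succ j =>
          simp only [pvScanRec, List.getD_cons_succ, List.length_cons]
          rw [ih j (by simpa using hi)]
          simp

-- cell read/write algebra
lemma getD_set_self {α : Type} (l : List α) (i : Nat) (v d : α) (h : i < l.length) :
    (l.set i v).getD i d = v := by
  simp only [List.getD]; rw [List.getElem?_set_self h]; rfl

lemma getD_set_ne {α : Type} (l : List α) (i j : Nat) (v d : α) (h : j ≠ i) :
    (l.set i v).getD j d = l.getD j d := by
  simp only [List.getD]; rw [List.getElem?_set_ne (Ne.symm h)]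

lemma getCell_setCell_same (info : List (List (List (String × Int)))) (r c : Nat)
    (v : List (String × Int)) (hr : r < info.length) (hc : c < (info.getD r []).length) :
    pvGetCell (pvSetCell info r c v) r c = v := by
  rw [pvGetCell] ; rw [pvSetCell, getD_set_self _ _ _ _ hr, getD_set_self _ _ _ _ hc]

lemma getCell_setCell_ne (info : List (List (List (String × Int)))) (r c : Nat)
    (v : List (String × Int)) (r' c' : Nat) (h : r' ≠ r ∨ c' ≠ c) :
    pvGetCell (pvSetCell info r c v) r' c' = pvGetCell info r' c' := by
  rcases h with h | h
  · rw [pvGetCell] ; rw [pvSetCell, getD_set_ne _ _ _ _ _ h]; rfl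
  · by_cases hr : r' = r
    · subst hr
      by_cases hlt : r' < info.length
      · rw [pvGetCell] ; rw [pvSetCell, getD_set_self _ _ _ _ hlt, getD_set_ne _ _ _ _ _ h]; rfl
      · rw [pvSetCell, pvGetCell, pvGetCell, List.set_eq_of_length_le (by omega)]
    · rw [pvGetCell] ; rw [pvSetCell, getD_set_ne _ _ _ _ _ hr]; rfl

lemma shape_setCell (m : List (List Int)) (info : List (List (List (String × Int)))) (r c : Nat)
    (v : List (String × Int)) (h : pvShape m info) : pvShape m (pvSetCell info r c v) := by
  obtain ⟨h1, h2⟩ := h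
  refine ⟨by rw [pvSetCell, List.length_set]; exact h1, fun r' hr' => ?_⟩
  by_cases hr : r' = r
  · subst hr
    by_cases hlt : r' < info.length
    · rw [pvSetCell, getD_set_self _ _ _ _ hlt]
      simpa using h2 r' hr'
    · rw [pvSetCell, List.set_eq_of_length_le (by omega)]
      exact h2 r' hr'
  · rw [pvSetCell, getD_set_ne _ _ _ _ _ hr]
    exact h2 r' hr'


def pvInfo0 (m : List (List Int)) : List (List (List (String × Int))) :=
  m.map (fun row => row.map (fun _ => ([] : List (String × Int))))

def pvInit (m : List (List Int)) : List (List (List (String × Int))) :=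
  (List.range m.length).foldl (fun info row =>
    (List.range m.length).foldl (fun info col =>
      pvSetCell info row col
        [("numZeroesBelow", if (m.getD row []).getD col 0 = 0 then (1 : Int) else 0),
         ("numZeroesRight", if (m.getD row []).getD col 0 = 0 then (1 : Int) else 0)]) info) (pvInfo0 m)

def pvColStep (m : List (List Int)) (row : Nat) (info : List (List (List (String × Int))))
    (col : Nat) : List (List (List (String × Int))) :=
  if (m.getD row []).getD col 0 = 1 then info
  else
    let info2 := if row < m.length - 1 then
        pvSetCell info row col
          (pvDSet (pvGetCell info row col) "numZeroesBelow"
            (pvDGet (pvGetCell info row col) "numZeroesBelow" +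
             pvDGet (pvGetCell info (row + 1) col) "numZeroesBelow"))
      else info
    if col < m.length - 1 then
        pvSetCell info2 row col
          (pvDSet (pvGetCell info2 row col) "numZeroesRight"
            (pvDGet (pvGetCell info2 row col) "numZeroesRight" +
             pvDGet (pvGetCell info2 row (col + 1)) "numZeroesRight"))
    else info2

lemma A_unfold (m : List (List Int)) :
    preComputeValues m =
      (List.range m.length).reverse.foldl (fun info row =>
        (List.range m.length).reverse.foldl (pvColStep m row) info) (pvInit m) := rfl

lemma dget_below (x y : Int) :
    pvDGet [("numZeroesBelow", x), ("numZeroesRight", y)] "numZeroesBelow" = x := by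
  simp [pvDGet]

lemma dget_right (x y : Int) :
    pvDGet [("numZeroesBelow", x), ("numZeroesRight", y)] "numZeroesRight" = y := by
  simp [pvDGet, List.find?]

lemma dset_below (x y v : Int) :
    pvDSet [("numZeroesBelow", x), ("numZeroesRight", y)] "numZeroesBelow" v
      = [("numZeroesBelow", v), ("numZeroesRight", y)] := by
  simp [pvDSet]

lemma dset_right (x y v : Int) :
    pvDSet [("numZeroesBelow", x), ("numZeroesRight", y)] "numZeroesRight" v
      = [("numZeroesBelow", x), ("numZeroesRight", v)] := by
  simp [pvDSet]

lemma pvBelow_rec (m : List (List Int)) (r c : Nat) (h1 : pvVal m r c ≠ 1)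
    (h2 : r + 1 < m.length) : pvBelow m r c = pvBase m r c + pvBelow m (r + 1) c := by
  rw [pvBelow]; simp [h1, h2]

lemma pvBelow_base (m : List (List Int)) (r c : Nat)
    (h : ¬(pvVal m r c ≠ 1 ∧ r + 1 < m.length)) : pvBelow m r c = pvBase m r c := by
  rw [pvBelow]; simp only [dif_neg h]

lemma pvRight_rec (m : List (List Int)) (r c : Nat) (h1 : pvVal m r c ≠ 1)
    (h2 : c + 1 < m.length) : pvRight m r c = pvBase m r c + pvRight m r (c + 1) := by
  rw [pvRight]; simp [h1, h2]

lemma pvRight_base (m : List (List Int)) (r c : Nat)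
    (h : ¬(pvVal m r c ≠ 1 ∧ c + 1 < m.length)) : pvRight m r c = pvBase m r c := by
  rw [pvRight]; simp only [dif_neg h]

lemma cellF_of_one (m : List (List Int)) (r c : Nat) (h : pvVal m r c = 1) :
    pvCellF m r c = pvCell0 m r c := by
  rw [pvCellF, pvCell0, pvBelow_base m r c (by simp [h]), pvRight_base m r c (by simp [h])]


lemma fill_row (m : List (List Int)) (f : Nat → List (String × Int)) (r : Nat)
    (hr : r < m.length) :
    ∀ n, n ≤ m.length → ∀ info, pvShape m info →
      pvShape m ((List.range n).foldl (fun info col => pvSetCell info r col (f col)) info) ∧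
      ∀ r' c', pvGetCell ((List.range n).foldl (fun info col => pvSetCell info r col (f col)) info) r' c'
        = if r' = r ∧ c' < n then f c' else pvGetCell info r' c' := by
  intro n
  induction n with
  | zero => intro _ info hsh; simp [hsh]
  | succ n ih =>
      intro hn info hsh
      rw [List.range_succ, List.foldl_append]
      obtain ⟨ihs, ihg⟩ := ih (by omega) info hsh
      simp only [List.foldl_cons, List.foldl_nil]
      refine ⟨shape_setCell _ _ _ _ _ ihs, fun r' c' => ?_⟩
      by_cases hrc : r' = r ∧ c' = n
      · obtain ⟨h1, h2⟩ := hrc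
        subst h1; subst h2
        rw [getCell_setCell_same _ _ _ _ (by rw [ihs.1]; omega) (by rw [ihs.2 r' hr]; omega)]
        simp
      · rw [getCell_setCell_ne _ _ _ _ _ _ (by tauto), ihg]
        by_cases h1 : r' = r
        · subst h1
          by_cases h2 : c' < n
          · simp [h2, (show c' < n + 1 by omega)]
          · have : ¬ c' < n + 1 := by
              rcases Decidable.not_and_iff_not_or_not.mp hrc with h | h
              · exact absurd rfl h
              · omega
            simp [h2, this]
        · simp [h1]

lemma init_all (m : List (List Int)) :
    ∀ k, k ≤ m.length → ∀ info, pvShape m info →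
      pvShape m ((List.range k).foldl (fun info row =>
        (List.range m.length).foldl (fun info col =>
          pvSetCell info row col
            [("numZeroesBelow", if (m.getD row []).getD col 0 = 0 then (1 : Int) else 0),
             ("numZeroesRight", if (m.getD row []).getD col 0 = 0 then (1 : Int) else 0)]) info) info) ∧
      ∀ r' c', pvGetCell ((List.range k).foldl (fun info row =>
        (List.range m.length).foldl (fun info col =>
          pvSetCell info row col
            [("numZeroesBelow", if (m.getD row []).getD col 0 = 0 then (1 : Int) else 0),
             ("numZeroesRight", if (m.getD row []).getD col 0 = 0 then (1 : Int) else 0)]) info) info) r' c'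
        = if r' < k ∧ c' < m.length then pvCell0 m r' c' else pvGetCell info r' c' := by
  intro k
  induction k with
  | zero =>
      intro _ info hsh
      simp only [List.range_zero, List.foldl_nil]
      exact ⟨hsh, fun r' c' => by simp⟩
  | succ k ih =>
      intro hk info hsh
      rw [List.range_succ, List.foldl_append]
      obtain ⟨ihs, ihg⟩ := ih (by omega) info hsh
      simp only [List.foldl_cons, List.foldl_nil]
      obtain ⟨fs, fg⟩ := fill_row m
        (fun col => [("numZeroesBelow", if (m.getD k []).getD col 0 = 0 then (1 : Int) else 0),
                     ("numZeroesRight", if (m.getD k []).getD col 0 = 0 then (1 : Int) else 0)])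
        k (by omega) m.length (le_refl _) _ ihs
      refine ⟨fs, fun r' c' => ?_⟩
      rw [fg, ihg]
      by_cases h1 : r' = k
      · subst h1
        by_cases h2 : c' < m.length
        · simp [h2, pvCell0, pvBase, pvVal]
        · simp [h2]
      · by_cases h2 : r' < k
        · simp [h1, h2, (show r' < k + 1 by omega)]
        · simp [h1, h2, (show ¬ r' < k + 1 by omega)]


lemma colstep_spec (m : List (List Int)) (r n : Nat) (hr : r < m.length) (hn : n < m.length)
    (info : List (List (List (String × Int)))) (hsh : pvShape m info)
    (hbelow : r + 1 < m.length → pvGetCell info (r + 1) n = pvCellF m (r + 1) n)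
    (hnext : n + 1 < m.length → pvGetCell info r (n + 1) = pvCellF m r (n + 1))
    (hcur : pvGetCell info r n = pvCell0 m r n) :
    pvShape m (pvColStep m r info n) ∧
    pvGetCell (pvColStep m r info n) r n = pvCellF m r n ∧
    ∀ r' c', (r' ≠ r ∨ c' ≠ n) → pvGetCell (pvColStep m r info n) r' c' = pvGetCell info r' c' := by
  by_cases h1 : (m.getD r []).getD n 0 = 1
  · rw [pvColStep, if_pos h1]
    exact ⟨hsh, by rw [hcur, cellF_of_one m r n h1], fun _ _ _ => rfl⟩
  · have h1' : pvVal m r n ≠ 1 := h1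
    rw [pvColStep, if_neg h1]
    have hrlen : r < info.length := by rw [hsh.1]; omega
    have hclen : n < (info.getD r []).length := by rw [hsh.2 r hr]; omega
    -- the intermediate matrix after the numZeroesBelow update
    set info2 := if r < m.length - 1 then
        pvSetCell info r n
          (pvDSet (pvGetCell info r n) "numZeroesBelow"
            (pvDGet (pvGetCell info r n) "numZeroesBelow" +
             pvDGet (pvGetCell info (r + 1) n) "numZeroesBelow"))
      else info with hinfo2
    have hinfo2s : pvShape m info2 := by
      rw [hinfo2]; split
      · exact shape_setCell _ _ _ _ _ hsh
      · exact hsh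
    have hinfo2ne : ∀ r' c', (r' ≠ r ∨ c' ≠ n) → pvGetCell info2 r' c' = pvGetCell info r' c' := by
      intro r' c' h
      rw [hinfo2]; split
      · exact getCell_setCell_ne _ _ _ _ _ _ h
      · rfl
    have hinfo2g : pvGetCell info2 r n
        = [("numZeroesBelow", pvBelow m r n), ("numZeroesRight", pvBase m r n)] := by
      rw [hinfo2]; split
      · rename_i h2
        rw [getCell_setCell_same _ _ _ _ hrlen hclen, hcur, hbelow (by omega)]
        rw [pvCell0, pvCellF, dget_below, dget_below, dset_below,
            ← pvBelow_rec m r n h1' (by omega)]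
      · rename_i h2
        rw [hcur, pvCell0, pvBelow_base m r n (by intro h; omega)]
    have hrlen2 : r < info2.length := by rw [hinfo2s.1]; omega
    have hclen2 : n < (info2.getD r []).length := by rw [hinfo2s.2 r hr]; omega
    split
    · rename_i h3
      refine ⟨shape_setCell _ _ _ _ _ hinfo2s, ?_, ?_⟩
      · rw [getCell_setCell_same _ _ _ _ hrlen2 hclen2, hinfo2g,
            hinfo2ne r (n + 1) (by right; omega), hnext (by omega)]
        rw [pvCellF, dget_right, dget_right, dset_right, ← pvRight_rec m r n h1' (by omega)]
        rfl
      · intro r' c' h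
        rw [getCell_setCell_ne _ _ _ _ _ _ h, hinfo2ne r' c' h]
    · rename_i h3
      refine ⟨hinfo2s, ?_, fun r' c' h => hinfo2ne r' c' h⟩
      rw [hinfo2g, pvCellF, pvRight_base m r n (by intro h; omega)]


lemma range_reverse_succ (n : Nat) : (List.range (n + 1)).reverse = n :: (List.range n).reverse := by
  rw [List.range_succ, List.reverse_append]; rfl

lemma pass2_row (m : List (List Int)) (r : Nat) (hr : r < m.length) :
    ∀ n, n ≤ m.length → ∀ info, pvShape m info →
      (∀ c', c' < m.length → r + 1 < m.length → pvGetCell info (r + 1) c' = pvCellF m (r + 1) c') →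
      (∀ c', n ≤ c' → c' < m.length → pvGetCell info r c' = pvCellF m r c') →
      (∀ c', c' < n → pvGetCell info r c' = pvCell0 m r c') →
      pvShape m ((List.range n).reverse.foldl (pvColStep m r) info) ∧
      (∀ c', c' < m.length → pvGetCell ((List.range n).reverse.foldl (pvColStep m r) info) r c' = pvCellF m r c') ∧
      (∀ r' c', r' ≠ r → pvGetCell ((List.range n).reverse.foldl (pvColStep m r) info) r' c' = pvGetCell info r' c') := by
  intro n
  induction n with
  | zero =>
      intro _ info hsh _ hge _
      exact ⟨hsh, fun c' hc' => hge c' (by omega) hc', fun _ _ _ => rfl⟩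
  | succ n ih =>
      intro hn info hsh hrow hge hlt
      rw [range_reverse_succ, List.foldl_cons]
      obtain ⟨cs, cg, cne⟩ := colstep_spec m r n hr (by omega) info hsh
        (fun h => hrow n (by omega) h)
        (fun h => hge (n + 1) (by omega) h)
        (hlt n (by omega))
      obtain ⟨ihs, ihg, ihne⟩ := ih (by omega) (pvColStep m r info n) cs
        (fun c' hc' h => by rw [cne (r + 1) c' (by left; omega)]; exact hrow c' hc' h)
        (fun c' hge' hc' => by
          by_cases hceq : c' = n
          · subst hceq; exact cg
          · rw [cne r c' (by right; omega)]; exact hge c' (by omega) hc')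
        (fun c' hc' => by rw [cne r c' (by right; omega)]; exact hlt c' (by omega))
      exact ⟨ihs, ihg, fun r' c' h => by rw [ihne r' c' h, cne r' c' (by left; exact h)]⟩

lemma pass2_all (m : List (List Int)) :
    ∀ k, k ≤ m.length → ∀ info, pvShape m info →
      (∀ r' c', k ≤ r' → r' < m.length → c' < m.length → pvGetCell info r' c' = pvCellF m r' c') →
      (∀ r' c', r' < k → c' < m.length → pvGetCell info r' c' = pvCell0 m r' c') →
      pvShape m ((List.range k).reverse.foldl (fun info row =>
        (List.range m.length).reverse.foldl (pvColStep m row) info) info) ∧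
      ∀ r' c', r' < m.length → c' < m.length →
        pvGetCell ((List.range k).reverse.foldl (fun info row =>
          (List.range m.length).reverse.foldl (pvColStep m row) info) info) r' c' = pvCellF m r' c' := by
  intro k
  induction k with
  | zero =>
      intro _ info hsh hfin _
      exact ⟨hsh, fun r' c' hr' hc' => hfin r' c' (by omega) hr' hc'⟩
  | succ k ih =>
      intro hk info hsh hfin hinit
      rw [range_reverse_succ, List.foldl_cons]
      obtain ⟨rs, rg, rne⟩ := pass2_row m k (by omega) m.length (le_refl _) info hsh
        (fun c' hc' h => hfin (k + 1) c' (le_refl _) h hc')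
        (fun c' hge hc' => by omega)
        (fun c' hc' => hinit k c' (by omega) hc')
      exact ih (by omega) _ rs
        (fun r' c' hge hr' hc' => by
          by_cases hreq : r' = k
          · subst hreq; exact rg c' hc'
          · rw [rne r' c' hreq]; exact hfin r' c' (by omega) hr' hc')
        (fun r' c' hlt hc' => by
          rw [rne r' c' (by omega)]; exact hinit r' c' (by omega) hc')


lemma getD_eq_of_lt {α : Type} (l : List α) (i : Nat) (d : α) (h : i < l.length) :
    l.getD i d = l[i] := List.getD_eq_getElem l d h

lemma getD_map_of_lt {α β : Type} (l : List α) (f : α → β) (i : Nat) (d : β)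
    (h : i < l.length) : (l.map f).getD i d = f l[i] := by
  rw [getD_eq_of_lt _ _ _ (by simpa using h), List.getElem_map]

lemma getD_map_range_of_lt {β : Type} (f : Nat → β) (n i : Nat) (d : β) (h : i < n) :
    ((List.range n).map f).getD i d = f i := by
  rw [getD_map_of_lt _ _ _ _ (by simpa using h), List.getElem_range]

lemma scan_col (m : List (List Int)) (c : Nat) :
    ∀ k r, m.length - r ≤ k → r < m.length →
      (pvScanRec ((List.range m.length).map (fun i => (m.getD i []).getD c 0))).getD r 0
        = pvBelow m r c := by
  intro k
  induction k with
  | zero => intro r hk hr; omega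
  | succ k ih =>
      intro r hk hr
      have hlen : ((List.range m.length).map (fun i => (m.getD i []).getD c 0)).length
          = m.length := by simp
      have hval : ∀ i, i < m.length →
          ((List.range m.length).map (fun i => (m.getD i []).getD c 0)).getD i 0
            = pvVal m i c := fun i hi => getD_map_range_of_lt _ _ _ _ hi
      rw [pvScanRec_getD _ r (by omega), hval r hr, hlen]
      by_cases hcond : pvVal m r c ≠ 1 ∧ r + 1 < m.length
      · rw [if_pos hcond, ih (r + 1) (by omega) hcond.2, pvBelow_rec m r c hcond.1 hcond.2]
        rfl
      · rw [if_neg hcond, pvBelow_base m r c hcond, add_zero]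
        rfl

lemma scan_row (m : List (List Int)) (pre : Pre_preComputeValues m) (r : Nat) (hr : r < m.length) :
    ∀ k c, m.length - c ≤ k → c < m.length →
      (pvScanRec (m.getD r [])).getD c 0 = pvRight m r c := by
  have hrowlen : (m.getD r []).length = m.length := by
    rw [getD_eq_of_lt _ _ _ hr]
    exact pre m[r] (List.getElem_mem hr)
  intro k
  induction k with
  | zero => intro c hk hc; omega
  | succ k ih =>
      intro c hk hc
      rw [pvScanRec_getD _ c (by omega), hrowlen]
      by_cases hcond : pvVal m r c ≠ 1 ∧ c + 1 < m.length
      · have : (m.getD r []).getD c 0 = pvVal m r c := rfl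
        rw [this, if_pos hcond, ih (c + 1) (by omega) hcond.2, pvRight_rec m r c hcond.1 hcond.2]
        rfl
      · have : (m.getD r []).getD c 0 = pvVal m r c := rfl
        rw [this, if_neg hcond, pvRight_base m r c hcond, add_zero]
        rfl

lemma alt_eq (m : List (List Int)) (pre : Pre_preComputeValues m) :
    preComputeValues_alt m =
      (List.range m.length).map (fun r => (List.range m.length).map (fun c => pvCellF m r c)) := by
  unfold preComputeValues_alt
  apply List.map_congr_left
  intro r hrmem
  have hr : r < m.length := List.mem_range.mp hrmem
  have hrowlen : (m.getD r []).length = m.length := by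
    rw [getD_eq_of_lt _ _ _ hr]
    exact pre m[r] (List.getElem_mem hr)
  have hL1 : (List.range m.length).map (fun c =>
        (((List.range m.length).map (fun c =>
          pvScan ((List.range m.length).map (fun r => (m.getD r []).getD c 0)))).getD c []).getD r 0)
      = (List.range m.length).map (fun c => pvBelow m r c) := by
    apply List.map_congr_left
    intro c hcmem
    have hc : c < m.length := List.mem_range.mp hcmem
    rw [getD_map_range_of_lt _ _ _ _ hc, pvScan_eq, scan_col m c m.length r (by omega) hr]
  have hL2 : (m.map pvScan).getD r [] = (List.range m.length).map (fun c => pvRight m r c) := by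
    rw [getD_map_of_lt _ _ _ _ hr, ← getD_eq_of_lt m r [] hr, pvScan_eq]
    apply List.ext_getElem (by rw [pvScanRec_length, hrowlen]; simp)
    intro c h1 h2
    have hc : c < m.length := by simpa using h2
    rw [List.getElem_map, List.getElem_range,
        ← getD_eq_of_lt _ _ (0 : Int) h1, scan_row m pre r hr m.length c (by omega) hc]
  rw [hL1, hL2, List.zip_map', List.map_map]
  rfl

lemma A_eq (m : List (List Int)) (pre : Pre_preComputeValues m) :
    preComputeValues m =
      (List.range m.length).map (fun r => (List.range m.length).map (fun c => pvCellF m r c)) := by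
  have hsh0 : pvShape m (pvInfo0 m) := by
    refine ⟨by simp [pvInfo0], fun r hr => ?_⟩
    rw [pvInfo0, getD_map_of_lt _ _ _ _ hr]
    simp only [List.length_map]
    exact pre m[r] (List.getElem_mem hr)
  obtain ⟨hinitS0, hinitG0⟩ := init_all m m.length (le_refl _) (pvInfo0 m) hsh0
  have hinitS : pvShape m (pvInit m) := hinitS0
  have hinitG : ∀ r' c', pvGetCell (pvInit m) r' c'
      = if r' < m.length ∧ c' < m.length then pvCell0 m r' c' else pvGetCell (pvInfo0 m) r' c' :=
    hinitG0
  obtain ⟨hshF, hcell⟩ := pass2_all m m.length (le_refl _) (pvInit m) hinitS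
    (fun r' c' hge hr' _ => by omega)
    (fun r' c' hr' hc' => by rw [hinitG r' c', if_pos ⟨hr', hc'⟩])
  rw [A_unfold]
  apply List.ext_getElem (by rw [hshF.1]; simp)
  intro r h1 h2
  have hr : r < m.length := by rw [← hshF.1]; exact h1
  rw [List.getElem_map, List.getElem_range]
  apply List.ext_getElem (by rw [← getD_eq_of_lt _ _ [] h1, hshF.2 r hr]; simp)
  intro c hc1 hc2
  have hc : c < m.length := by
    have := hshF.2 r hr
    rw [getD_eq_of_lt _ _ [] h1] at this
    omega
  rw [List.getElem_map, List.getElem_range]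
  have := hcell r c hr hc
  rw [pvGetCell, getD_eq_of_lt _ _ [] h1, getD_eq_of_lt _ _ [] (by omega)] at this
  exact this

-- ===== VERDICT (by name: the statement is the Claim_ definition above) =====
theorem preComputeValues_spec : Claim_equal_preComputeValues := by
  intro m _dom pre
  show preComputeValues m = preComputeValues_alt m
  rw [A_eq m pre, alt_eq m pre]
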